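-- pv_equiv track=rewrite | github.com/rafaelmarino/aoc2021 | code/day16.py | compute_spv
-- ===== SOURCE A (Python) =====
-- def compute_spv(tid, bits, spv):
--     """--- Part Two ---"""
--     if tid == 0:
--         return (bits, sum(spv))
--     if tid == 1:
--         prod = 1
--         for v in spv:
--             prod *= v
--         return (bits, prod)
--     if tid == 2:
--         return (bits, min(spv))
--     if tid == 3:
--         return (bits, max(spv))
--     if tid == 5:
--         return (bits, 1 if spv[0] > spv[1] else 0)
--     if tid == 6:
--         return (bits, 1 if spv[0] < spv[1] else 0)
--     if tid == 7:
--         return (bits, 1 if spv[0] == spv[1] else 0)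
-- ===== SOURCE B (Python) =====
-- def compute_spv(tid, bits, spv):
--     def prod(s):
--         if len(s) <= 1:
--             return s[0] if s else 1
--         m = len(s) // 2
--         return prod(s[:m]) * prod(s[m:])
--     ops = {0: sum,
--            1: prod,
--            2: min,
--            3: max,
--            5: lambda s: int(s[0] > s[1]),
--            6: lambda s: int(s[0] < s[1]),
--            7: lambda s: int(s[0] == s[1])}
--     return (bits, ops[tid](spv))
-- ===== Notes on version B (the rewrite author's own statement) =====
-- stated objective: idiomatic
-- what changed: Replaces A's sequential if-chain with a single dispatch-table lookup (tid -> operation) applied once, and computes the product by divide-and-conquer recursion instead of an accumulator loop.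
-- outside the precondition, e.g. on compute_spv(4, 3, [1, 2]): A returns None, B raises KeyError
import Mathlib
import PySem

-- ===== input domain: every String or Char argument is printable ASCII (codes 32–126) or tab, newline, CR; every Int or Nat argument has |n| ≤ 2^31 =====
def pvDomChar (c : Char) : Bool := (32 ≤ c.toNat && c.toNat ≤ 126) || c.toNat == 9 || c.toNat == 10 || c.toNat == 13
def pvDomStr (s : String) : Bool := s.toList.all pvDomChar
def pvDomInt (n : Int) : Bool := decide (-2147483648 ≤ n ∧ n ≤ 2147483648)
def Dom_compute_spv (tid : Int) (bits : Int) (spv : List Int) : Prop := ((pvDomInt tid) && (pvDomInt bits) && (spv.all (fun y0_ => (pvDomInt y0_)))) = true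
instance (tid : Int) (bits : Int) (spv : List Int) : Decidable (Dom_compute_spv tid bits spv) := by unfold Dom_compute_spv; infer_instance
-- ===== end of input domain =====

-- ===== PORT A =====
-- B replaces A's if-chain with a dispatch-table lookup; agreement proved on Pre_ (tids A handles, no out-of-range access).
def compute_spv (tid : Int) (bits : Int) (spv : List Int) : Int × Int :=
  if tid = 0 then (bits, spv.foldl (· + ·) 0)
  else if tid = 1 then (bits, spv.foldl (fun prod v => prod * v) 1)
  else if tid = 2 then (bits, (PySem.List.min? spv (fun x => x)).getD 0)
  else if tid = 3 then (bits, (PySem.List.max? spv (fun x => x)).getD 0)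
  else if tid = 5 then (bits, if (PySem.List.pyGet? spv 0).getD 0 > (PySem.List.pyGet? spv 1).getD 0 then 1 else 0)
  else if tid = 6 then (bits, if (PySem.List.pyGet? spv 0).getD 0 < (PySem.List.pyGet? spv 1).getD 0 then 1 else 0)
  else if tid = 7 then (bits, if (PySem.List.pyGet? spv 0).getD 0 = (PySem.List.pyGet? spv 1).getD 0 then 1 else 0)
  else (bits, 0)  -- Python returns None here; excluded by Pre_

-- ===== PORT B =====
def pvProd (s : List Int) : Int :=
  if s.length ≤ 1 then (match s with | [] => 1 | v :: _ => v)
  else pvProd (s.take (s.length / 2)) * pvProd (s.drop (s.length / 2))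
termination_by s.length
decreasing_by
  · simp; omega
  · simp; omega

def pvOps : List (Int × (List Int → Int)) :=
  [(0, fun s => s.foldl (· + ·) 0),
   (1, pvProd),
   (2, fun s => (PySem.List.min? s (fun x => x)).getD 0),
   (3, fun s => (PySem.List.max? s (fun x => x)).getD 0),
   (5, fun s => if (PySem.List.pyGet? s 0).getD 0 > (PySem.List.pyGet? s 1).getD 0 then 1 else 0),
   (6, fun s => if (PySem.List.pyGet? s 0).getD 0 < (PySem.List.pyGet? s 1).getD 0 then 1 else 0),
   (7, fun s => if (PySem.List.pyGet? s 0).getD 0 = (PySem.List.pyGet? s 1).getD 0 then 1 else 0)]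

def compute_spv_alt (tid : Int) (bits : Int) (spv : List Int) : Int × Int :=
  match pvOps.find? (fun p => p.1 == tid) with
  | some p => (bits, p.2 spv)
  | none => (bits, 0)  -- Python raises KeyError here; excluded by Pre_

-- ===== PRECONDITION & SPEC =====
-- Pre_ excludes tids A falls through on (returning None, not an int pair), the empty list for
-- min/max (ValueError) and fewer than two elements for the comparisons (IndexError).
def Pre_compute_spv (tid : Int) (bits : Int) (spv : List Int) : Prop :=
  tid = 0 ∨ tid = 1 ∨ ((tid = 2 ∨ tid = 3) ∧ spv ≠ []) ∨ ((tid = 5 ∨ tid = 6 ∨ tid = 7) ∧ 2 ≤ spv.length)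
instance (tid : Int) (bits : Int) (spv : List Int) : Decidable (Pre_compute_spv tid bits spv) := by unfold Pre_compute_spv; infer_instance
def pvWitness_compute_spv : Int × Int × List Int := (1, 5, [2, 3, 4])
def Spec_compute_spv (tid : Int) (bits : Int) (spv : List Int) (out : Int × Int) : Prop := out = compute_spv_alt tid bits spv
instance (tid : Int) (bits : Int) (spv : List Int) (out : Int × Int) : Decidable (Spec_compute_spv tid bits spv out) := by unfold Spec_compute_spv; infer_instance

-- ===== CLAIM (what is proved, stated in full; the proofs are below) =====
def Claim_equal_compute_spv : Prop := ∀ (tid : Int) (bits : Int) (spv : List Int), Dom_compute_spv tid bits spv → Pre_compute_spv tid bits spv → Spec_compute_spv tid bits spv (compute_spv tid bits spv)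

-- ===== LEMMAS AND PROOFS =====
theorem pvProd_eq_prod (s : List Int) : pvProd s = s.prod := by
  rw [pvProd.eq_def]
  split
  · rename_i h
    match s, h with
    | [], _ => simp
    | [v], _ => simp
  · rename_i h
    rw [pvProd_eq_prod, pvProd_eq_prod, ← List.prod_append, List.take_append_drop]
termination_by s.length
decreasing_by
  · simp; omega
  · simp; omega

theorem foldl_mul_eq_pvProd (s : List Int) (a : Int) : s.foldl (fun p v => p * v) a = a * pvProd s := by
  rw [pvProd_eq_prod]
  induction s generalizing a with
  | nil => simp
  | cons v t ih => simp [List.foldl, ih (a * v), mul_assoc]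

-- ===== VERDICT (by name: the statement is the Claim_ definition above) =====
theorem compute_spv_spec : Claim_equal_compute_spv := by
  intro tid bits spv _ hpre
  unfold Spec_compute_spv compute_spv compute_spv_alt pvOps
  rcases hpre with h | h | ⟨h | h, _⟩ | ⟨h | h | h, _⟩ <;> subst h <;>
    simp [List.find?, foldl_mul_eq_pvProd]
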